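-- pv_equiv track=rewrite | github.com/mdangschat/ctc-asr | asr/dataset_util/wav_lengths.py | _bucketing
-- ===== SOURCE A (Python) =====
-- def _bucketing(number_buckets, sample_lengths):
--     if number_buckets <= 0:
--         return None
--
--     number_examples = len(sample_lengths)
--     step = number_examples // number_buckets
--     sorted_lengths = sorted(sample_lengths)
--     buckets = [sorted_lengths[i] for i in range(0, len(sorted_lengths), step)]
--     # Make sure the last bucket aligns with the highest value.
--     if buckets[-1] != sorted_lengths[-1]:
--         buckets[-1] = sorted_lengths[-1]
--
--     return buckets
-- ===== SOURCE B (Python) =====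
-- def _mselect(xs, ks):
--     """Values of sorted(xs) at the ascending 0-based ranks ks, by recursive
--     three-way partition around the middle element (multi-rank quickselect)."""
--     if not ks:
--         return []
--     p = xs[len(xs) // 2]
--     lt = [x for x in xs if x < p]
--     gt = [x for x in xs if x > p]
--     eq = sum(1 for x in xs if x == p)
--     lo = len(lt)
--     hi = lo + eq
--     return (_mselect(lt, [k for k in ks if k < lo])
--             + [p] * len([k for k in ks if lo <= k < hi])
--             + _mselect(gt, [k - hi for k in ks if hi <= k]))
--
--
-- def _bucketing(number_buckets, sample_lengths):
--     if number_buckets <= 0: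
--         return None
--     n = len(sample_lengths)
--     step = n // number_buckets
--     count = -(-n // step)
--     out = _mselect(sample_lengths, [i * step for i in range(count - 1)])
--     out.append(max(sample_lengths))
--     return out
-- ===== Notes on version B (the rewrite author's own statement) =====
-- stated objective: alternative
-- what changed: A fully sorts the list, slices every step-th element and patches the last slot to the maximum; B never builds the sorted list: a recursive multi-rank quickselect three-way-partitions around a middle pivot and descends only into the partitions that still contain needed bucket ranks, closing with max().
import Mathlib
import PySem

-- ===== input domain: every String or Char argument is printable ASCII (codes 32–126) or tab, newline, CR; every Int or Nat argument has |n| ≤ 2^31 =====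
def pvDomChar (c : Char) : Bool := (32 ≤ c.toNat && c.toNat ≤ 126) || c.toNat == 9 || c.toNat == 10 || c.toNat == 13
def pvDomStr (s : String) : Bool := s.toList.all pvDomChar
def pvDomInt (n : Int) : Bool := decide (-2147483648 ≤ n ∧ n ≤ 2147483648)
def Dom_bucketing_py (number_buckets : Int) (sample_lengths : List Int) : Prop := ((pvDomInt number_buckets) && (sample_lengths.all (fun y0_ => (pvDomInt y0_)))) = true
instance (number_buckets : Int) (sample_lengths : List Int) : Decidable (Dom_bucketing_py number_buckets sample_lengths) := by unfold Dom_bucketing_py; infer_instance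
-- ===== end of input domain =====

-- B replaces A's full sort + slice + last-element patch by a multi-rank quickselect that
-- partitions once around a pivot and recurses only where needed ranks fall, plus max()
-- for the last bucket (objective: alternative).

-- ===== PORT A =====
def bucketing_py (number_buckets : Int) (sample_lengths : List Int) : Option (List Int) :=
  if number_buckets ≤ 0 then none
  else
    let number_examples : Int := (sample_lengths.length : Int)
    let step : Int := PySem.Int.floordiv number_examples number_buckets
    let sorted_lengths : List Int := PySem.List.sorted sample_lengths (fun x => x) false
    let buckets : List Int :=
      (PySem.List.pyRange 0 (sorted_lengths.length : Int) step).map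
        (fun i => (PySem.List.pyGet? sorted_lengths i).getD 0)
    match PySem.List.pyGet? buckets (-1), PySem.List.pyGet? sorted_lengths (-1) with
    | some b, some l => if b ≠ l then some (buckets.dropLast ++ [l]) else some buckets
    | _, _ => none   -- IndexError (empty list); excluded by Pre_

-- ===== PORT B =====
-- pivot choice of Source B's _mselect: xs[len(xs)//2]
def pvPivot (x : Int) (rest : List Int) : Int := (x :: rest).getD ((x :: rest).length / 2) x

-- the pivot is an element of the list (used by pvMSelect's termination)
lemma pvMid_mem (x : Int) (rest : List Int) : pvPivot x rest ∈ x :: rest := by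
  rw [pvPivot]
  rw [List.getD_eq_getElem _ _ (Nat.div_lt_self (by simp) (by omega))]
  exact List.getElem_mem _

-- a filter that misses some element of the list is strictly shorter (pvMSelect's termination)
lemma pvFilter_lt_length (q : Int → Bool) (xs : List Int) (p : Int) (hp : p ∈ xs)
    (hq : q p = false) : (xs.filter q).length < xs.length := by
  rcases List.append_of_mem hp with ⟨pre, suf, rfl⟩
  simp only [List.filter_append, List.filter_cons, hq, Bool.false_eq_true, if_false,
    List.length_append, List.length_cons]
  have h1 := List.length_filter_le q pre
  have h2 := List.length_filter_le q suf
  omega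

-- multi-rank quickselect (three-way partition around the middle element), Source B's _mselect
def pvMSelect : List Int → List Int → List Int
  | _, [] => []
  | [], _ :: _ => []   -- IndexError in Python; unreachable under the bounds proved below
  | x :: rest, k0 :: ktl =>
    let p := pvPivot x rest
    let lt := (x :: rest).filter (fun y => decide (y < p))
    let eqc := ((x :: rest).filter (fun y => decide (y = p))).length
    let lo : Int := (lt.length : Int)
    let hi : Int := lo + (eqc : Int)
    pvMSelect lt ((k0 :: ktl).filter (fun k => decide (k < lo)))
      ++ List.replicate ((k0 :: ktl).filter (fun k => decide (lo ≤ k ∧ k < hi))).length p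
      ++ pvMSelect ((x :: rest).filter (fun y => decide (p < y)))
          (((k0 :: ktl).filter (fun k => decide (hi ≤ k))).map (fun k => k - hi))
termination_by xs _ => xs.length
decreasing_by
  · exact pvFilter_lt_length _ _ _ (pvMid_mem x rest) (by simp)
  · exact pvFilter_lt_length _ _ _ (pvMid_mem x rest) (by simp)

def bucketing_py_alt (number_buckets : Int) (sample_lengths : List Int) : Option (List Int) :=
  if number_buckets ≤ 0 then none
  else
    let n : Int := (sample_lengths.length : Int)
    let step : Int := PySem.Int.floordiv n number_buckets
    let count : Int := -(PySem.Int.floordiv (-n) step)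
    let out : List Int :=
      pvMSelect sample_lengths ((PySem.List.pyRange 0 (count - 1) 1).map (fun i => i * step))
    match PySem.List.max? sample_lengths (fun x => x) with
    | some m => some (out ++ [m])
    | none => none   -- ValueError: max() of empty list; excluded by Pre_

-- ===== PRECONDITION & SPEC =====
-- Pre_ excludes exactly the inputs where A raises: 0 < number_buckets together with
-- len(sample_lengths) < number_buckets makes step = 0 and range(0, n, 0) a ValueError.
def Pre_bucketing_py (number_buckets : Int) (sample_lengths : List Int) : Prop :=
  number_buckets ≤ 0 ∨ number_buckets ≤ (sample_lengths.length : Int)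
instance (number_buckets : Int) (sample_lengths : List Int) : Decidable (Pre_bucketing_py number_buckets sample_lengths) := by unfold Pre_bucketing_py; infer_instance

def pvWitness_bucketing_py : Int × List Int := (2, [3, 1, 4, 1, 5])

def Spec_bucketing_py (number_buckets : Int) (sample_lengths : List Int) (out : Option (List Int)) : Prop := out = bucketing_py_alt number_buckets sample_lengths
instance (number_buckets : Int) (sample_lengths : List Int) (out : Option (List Int)) : Decidable (Spec_bucketing_py number_buckets sample_lengths out) := by unfold Spec_bucketing_py; infer_instance

-- ===== CLAIM (what is proved, stated in full; the proofs are below) =====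
def Claim_equal_bucketing_py : Prop := ∀ (number_buckets : Int) (sample_lengths : List Int), Dom_bucketing_py number_buckets sample_lengths → Pre_bucketing_py number_buckets sample_lengths → Spec_bucketing_py number_buckets sample_lengths (bucketing_py number_buckets sample_lengths)

-- ===== LEMMAS AND PROOFS =====

-- counts of a filter the element fails
lemma count_filter_zero (q : Int → Bool) (xs : List Int) (a : Int) (h : q a = false) :
    List.count a (xs.filter q) = 0 := by
  refine List.count_eq_zero.2 (fun hm => ?_)
  rw [List.mem_filter] at hm
  simp [hm.2] at h

-- the three-way partition of xs around p is a permutation of xs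
lemma partition_perm (p : Int) (xs : List Int) :
    xs.Perm (xs.filter (fun x => decide (x < p)) ++ xs.filter (fun x => decide (x = p))
             ++ xs.filter (fun x => decide (p < x))) := by
  rw [List.perm_iff_count]
  intro a
  simp only [List.count_append]
  rcases lt_trichotomy a p with h | h | h
  · rw [List.count_filter (p := fun x => decide (x < p)) (by simp [h]),
        count_filter_zero _ _ _ (by simp; omega), count_filter_zero _ _ _ (by simp; omega)]
    omega
  · rw [List.count_filter (p := fun x => decide (x = p)) (by simp [h]),
        count_filter_zero _ _ _ (by simp; omega), count_filter_zero _ _ _ (by simp; omega)]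
    omega
  · rw [List.count_filter (p := fun x => decide (p < x)) (by simp [h]),
        count_filter_zero _ _ _ (by simp; omega), count_filter_zero _ _ _ (by simp; omega)]
    omega

lemma pairwise_le_of_all_eq (p : Int) (l : List Int) (h : ∀ x ∈ l, x = p) :
    l.Pairwise (fun a b : Int => a ≤ b) := by
  induction l with
  | nil => simp
  | cons a t ih =>
    refine List.Pairwise.cons (fun b hb => ?_) (ih (fun x hx => h x (List.mem_cons_of_mem a hx)))
    rw [h a List.mem_cons_self, h b (List.mem_cons_of_mem a hb)]
lemma sorted_partition (p : Int) (xs : List Int) :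
    PySem.List.sorted xs (fun x => x) false =
      PySem.List.sorted (xs.filter (fun x => decide (x < p))) (fun x => x) false
      ++ xs.filter (fun x => decide (x = p))
      ++ PySem.List.sorted (xs.filter (fun x => decide (p < x))) (fun x => x) false := by
  apply PySem.List.eq_of_perm_of_pairwise_le_of_injective (fun x => x) (fun a b h => h)
  · exact (PySem.List.sorted_perm xs _ false).trans
      ((partition_perm p xs).trans
        (List.Perm.append (List.Perm.append (PySem.List.sorted_perm _ _ false).symm (List.Perm.refl _)) (PySem.List.sorted_perm _ _ false).symm))
  · exact PySem.List.sorted_pairwise xs _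
  · rw [List.pairwise_append, List.pairwise_append]
    refine ⟨⟨PySem.List.sorted_pairwise _ _, pairwise_le_of_all_eq p _ (fun x hx => by
        rw [List.mem_filter] at hx; exact_mod_cast of_decide_eq_true hx.2), fun x hx y hy => ?_⟩,
      PySem.List.sorted_pairwise _ _, fun x hx y hy => ?_⟩
    · rw [PySem.List.mem_sorted, List.mem_filter] at hx
      rw [List.mem_filter] at hy
      have h1 : x < p := of_decide_eq_true hx.2
      have h2 : y = p := of_decide_eq_true hy.2
      omega
    · rw [PySem.List.mem_sorted, List.mem_filter] at hy
      have h2 : p < y := of_decide_eq_true hy.2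
      rw [List.mem_append] at hx
      rcases hx with hx | hx
      · rw [PySem.List.mem_sorted, List.mem_filter] at hx
        have h1 : x < p := of_decide_eq_true hx.2
        omega
      · rw [List.mem_filter] at hx
        have h1 : x = p := of_decide_eq_true hx.2
        omega

-- a ≤-sorted list splits at any threshold into its below- and above-filters
lemma sorted_ks_split (a : Int) (ks : List Int) (hs : ks.Pairwise (fun x y : Int => x ≤ y)) :
    ks.filter (fun k => decide (k < a)) ++ ks.filter (fun k => decide (a ≤ k)) = ks := by
  induction ks with
  | nil => simp
  | cons h t ih =>
    rcases List.pairwise_cons.1 hs with ⟨hht, ht⟩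
    by_cases hc : h < a
    · simp only [List.filter_cons, hc, decide_true, if_true,
        not_le.2 hc, decide_false, Bool.false_eq_true, if_false, List.cons_append]
      rw [ih ht]
    · have h1 : t.filter (fun k => decide (k < a)) = [] :=
        List.filter_eq_nil_iff.2 (fun k hk => by
          have := hht k hk
          simp only [decide_eq_true_eq]
          omega)
      have h2 : t.filter (fun k => decide (a ≤ k)) = t :=
        List.filter_eq_self.2 (fun k hk => by
          have := hht k hk
          simp only [decide_eq_true_eq]
          omega)
      simp only [List.filter_cons, hc, decide_false, Bool.false_eq_true, if_false,
        not_lt.1 hc, decide_true, if_true, h1, h2, List.nil_append]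

-- multi-rank quickselect returns the entries of the sorted list at the given ranks
theorem msel_correct (xs ks : List Int)
    (hb : ∀ k ∈ ks, 0 ≤ k ∧ k < (xs.length : Int))
    (hs : ks.Pairwise (fun x y : Int => x ≤ y)) :
    pvMSelect xs ks = ks.map (fun k => (PySem.List.sorted xs (fun x => x) false).getD k.toNat 0) := by
  match ks with
  | [] => rw [pvMSelect]; simp
  | k0 :: ktl =>
    match hxs : xs with
    | [] =>
      exfalso
      have := hb k0 List.mem_cons_self
      simp at this
      omega
    | x :: rest =>
      set p := pvPivot x rest with hp
      have hpm : p ∈ x :: rest := pvMid_mem x rest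
      set L := (x :: rest).filter (fun y => decide (y < p)) with hL
      set E := (x :: rest).filter (fun y => decide (y = p)) with hE
      set G := (x :: rest).filter (fun y => decide (p < y)) with hG
      have hlen : L.length + E.length + G.length = (x :: rest).length := by
        have h := (partition_perm p (x :: rest)).length_eq
        rw [← hL, ← hE, ← hG] at h
        simp only [List.length_append] at h
        omega
      have hLlt : L.length < (x :: rest).length := by
        rw [hL]; exact pvFilter_lt_length _ _ _ hpm (by simp)
      have hGlt : G.length < (x :: rest).length := by
        rw [hG]; exact pvFilter_lt_length _ _ _ hpm (by simp)
      have hsplit := sorted_partition p (x :: rest)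
      rw [← hL, ← hE, ← hG] at hsplit
      set lo : Int := (L.length : Int) with hlo
      set hi : Int := lo + (E.length : Int) with hhi
      set ks : List Int := k0 :: ktl with hks
      -- the three rank groups
      set A1 := ks.filter (fun k => decide (k < lo)) with hA1
      set A2 := ks.filter (fun k => decide (lo ≤ k ∧ k < hi)) with hA2
      set A3 := ks.filter (fun k => decide (hi ≤ k)) with hA3
      have hks123 : A1 ++ A2 ++ A3 = ks := by
        have h12 := sorted_ks_split lo ks hs
        have hmid := sorted_ks_split hi (ks.filter (fun k => decide (lo ≤ k)))
          (List.Pairwise.filter _ hs)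
        rw [List.filter_filter, List.filter_filter] at hmid
        have e2 : (ks.filter fun k => decide (k < hi) && decide (lo ≤ k)) = A2 := by
          rw [hA2]
          apply List.filter_congr
          intro k _
          by_cases h1 : lo ≤ k <;> by_cases h2 : k < hi <;> simp [h1, h2]
        have e3 : (ks.filter fun k => decide (hi ≤ k) && decide (lo ≤ k)) = A3 := by
          rw [hA3]
          apply List.filter_congr
          intro k _
          by_cases h1 : hi ≤ k
          · have h2 : lo ≤ k := by omega
            simp [h1, h2]
          · simp [h1]
        rw [e2, e3] at hmid
        rw [List.append_assoc, hmid, h12]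
      -- evaluate the three pieces
      rw [pvMSelect]
      simp only [← hp, ← hL, ← hE, ← hG, ← hlo, ← hhi, ← hks, ← hA1, ← hA2, ← hA3]
      have ih1 : pvMSelect L A1 =
          A1.map (fun k => (PySem.List.sorted L (fun x => x) false).getD k.toNat 0) := by
        apply msel_correct
        · intro k hk
          rw [hA1, List.mem_filter] at hk
          have h1 := (hb k hk.1).1
          have h2 := of_decide_eq_true hk.2
          exact ⟨h1, by omega⟩
        · exact List.Pairwise.filter _ hs
      have ih3 : pvMSelect G (A3.map (fun k => k - hi)) =
          (A3.map (fun k => k - hi)).map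
            (fun k => (PySem.List.sorted G (fun x => x) false).getD k.toNat 0) := by
        apply msel_correct
        · intro k hk
          rw [List.mem_map] at hk
          obtain ⟨k', hk', rfl⟩ := hk
          rw [hA3, List.mem_filter] at hk'
          have h1 := of_decide_eq_true hk'.2
          have h2 := (hb k' hk'.1).2
          simp only [List.length_cons] at h2 hlen ⊢
          constructor <;> omega
        · have := List.Pairwise.filter (fun k => decide (hi ≤ k)) hs
          rw [← hA3] at this
          exact List.Pairwise.map _ (by intro a b hab; omega) this
      rw [ih1, ih3]
      conv_rhs => rw [← hks123]
      rw [List.map_append, List.map_append]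
      congr 1
      · congr 1
        · -- first piece: indices below lo read inside sorted L
          apply List.map_congr_left
          intro k hk
          rw [hA1, List.mem_filter] at hk
          have h1 := (hb k hk.1).1
          have h2 := of_decide_eq_true hk.2
          rw [hsplit, List.append_assoc, List.getD_append _ _ _ _ (by
            rw [PySem.List.length_sorted]; omega)]
        · -- middle piece: indices in [lo, hi) all read the pivot
          have hconst : ∀ k ∈ A2,
              (PySem.List.sorted (x :: rest) (fun x => x) false).getD k.toNat 0 = p := by
            intro k hk
            rw [hA2, List.mem_filter] at hk
            have h1 := of_decide_eq_true hk.2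
            have h0 := (hb k hk.1).1
            rw [hsplit, List.append_assoc,
                List.getD_append_right _ _ _ _ (by rw [PySem.List.length_sorted]; omega),
                PySem.List.length_sorted, List.getD_append _ _ _ _ (by omega)]
            have hall : ∀ y ∈ E, y = p := by
              intro y hy
              rw [hE, List.mem_filter] at hy
              exact of_decide_eq_true hy.2
            rw [List.getD_eq_getElem _ _ (by omega)]
            exact hall _ (List.getElem_mem _)
          rw [List.map_congr_left hconst]
          simp
      · -- last piece: indices at or above hi read inside sorted G, shifted by hi
        rw [List.map_map]
        apply List.map_congr_left
        intro k hk
        rw [hA3, List.mem_filter] at hk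
        have h1 := of_decide_eq_true hk.2
        have h2 := (hb k hk.1).2
        simp only [Function.comp]
        rw [hsplit, List.append_assoc,
            List.getD_append_right _ _ _ _ (by rw [PySem.List.length_sorted]; omega),
            PySem.List.length_sorted,
            List.getD_append_right _ _ _ _ (by omega)]
        congr 1
        omega
termination_by xs.length
decreasing_by
  · rw [hxs]; exact hLlt
  · rw [hxs]; exact hGlt

-- an element of a sorted-ascending list is at most its last element
lemma le_getLast_sorted (xs : List Int) (s : List Int) (hs : s = PySem.List.sorted xs (fun x => x) false)
    (h : s ≠ []) (a : Int) (ha : a ∈ s) : a ≤ s.getLast h := by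
  obtain ⟨i, hi, rfl⟩ := List.mem_iff_getElem.1 ha
  rw [List.getLast_eq_getElem]
  subst hs
  exact PySem.List.sorted_id_getElem_mono _ (by omega) _

-- A = B on every admitted input
lemma bucketing_eq (nb : Int) (sl : List Int) (hpre : nb ≤ 0 ∨ nb ≤ (sl.length : Int)) :
    bucketing_py nb sl = bucketing_py_alt nb sl := by
  by_cases hnb : nb ≤ 0
  · simp [bucketing_py, bucketing_py_alt, hnb]
  · have hnb' : 0 < nb := by omega
    have hn : nb ≤ (sl.length : Int) := hpre.resolve_left hnb
    have hn1 : 1 ≤ (sl.length : Int) := by omega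
    set n : Int := (sl.length : Int) with hndef
    set step : Int := PySem.Int.floordiv n nb with hstepdef
    have hstep : 1 ≤ step := by
      rw [hstepdef, PySem.Int.le_floordiv_iff_mul_le hnb']; omega
    set s : List Int := PySem.List.sorted sl (fun x => x) false with hsdef
    have hslen : (s.length : Int) = n := by rw [hsdef, PySem.List.length_sorted]
    have hsne : s ≠ [] := by
      intro hnil; rw [hnil] at hslen; simp at hslen; omega
    -- the ceiling count
    set q : Int := (n + step - 1) / step with hqdef
    have hr1 := Int.mul_ediv_add_emod (n + step - 1) step
    have hr2 := Int.emod_nonneg (n + step - 1) (by omega : step ≠ 0)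
    have hr3 := Int.emod_lt_of_pos (n + step - 1) (by omega : 0 < step)
    have hqstep : (q - 1) * step < n ∧ n ≤ q * step := by
      constructor <;> nlinarith [hr1, hr2, hr3]
    have hq1 : 1 ≤ q := by nlinarith [hqstep.1, hqstep.2]
    have hcount : -(PySem.Int.floordiv (-n) step) = q := by
      rw [PySem.Int.neg_floordiv_neg_eq_iff_of_pos (by omega)]
      exact hqstep
    -- the index bound for every selected rank
    have hbound : ∀ i : Nat, (i : Int) < q → step * i < n := by
      intro i hi
      have : (i : Int) ≤ q - 1 := by omega
      nlinarith [hqstep.1]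
    -- A's bucket list as a map over List.range
    have hrange : PySem.List.pyRange 0 n step =
        (List.range q.toNat).map (fun k : Nat => (0 : Int) + step * (k : Int)) := by
      rw [PySem.List.pyRange_of_pos 0 n (by omega), if_pos (by omega),
          show n - 0 + step - 1 = n + step - 1 by ring, hqdef]
    -- A's buckets as a clean map M over List.range
    have hbuckets :
        (PySem.List.pyRange 0 n step).map (fun i => (PySem.List.pyGet? s i).getD 0)
          = (List.range q.toNat).map (fun k : Nat => s.getD (step * (k : Int)).toNat 0) := by
      rw [hrange, List.map_map]
      apply List.map_congr_left
      intro i hi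
      rw [List.mem_range] at hi
      have hiq : (i : Int) < q := by omega
      simp only [Function.comp, zero_add]
      rw [PySem.List.pyGet?_of_nonneg s (by positivity), ← List.getD_eq_getElem?_getD]
    set M : Nat → Int := fun k => s.getD (step * k).toNat 0 with hMdef
    set B : List Int := (List.range q.toNat).map M with hBdef
    have hBlen : B.length = q.toNat := by rw [hBdef, List.length_map, List.length_range]
    have hBne : B ≠ [] := by
      intro hnil; rw [hnil] at hBlen; simp at hBlen; omega
    -- B's selected ranks are B's buckets without the last one
    have hout : pvMSelect sl ((PySem.List.pyRange 0 (q - 1) 1).map (fun i => i * step))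
        = B.dropLast := by
      rw [PySem.List.pyRange_one, List.map_map, msel_correct, List.map_map]
      · have hq' : List.range q.toNat = List.range (q.toNat - 1) ++ [q.toNat - 1] := by
          conv_lhs => rw [show q.toNat = (q.toNat - 1) + 1 by omega, List.range_succ]
        have hdrop : B.dropLast = (List.range (q.toNat - 1)).map M := by
          rw [hBdef, hq', List.map_append, List.map_singleton, List.dropLast_concat]
        rw [hdrop]
        have htn : (q - 1 - 0).toNat = q.toNat - 1 := by omega
        rw [htn]
        apply List.map_congr_left
        intro i hi
        rw [List.mem_range] at hi
        simp only [Function.comp, zero_add]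
        rw [← hsdef, hMdef]
        congr 2
        ring
      · intro k hk
        rw [List.mem_map] at hk
        obtain ⟨i, hi, rfl⟩ := hk
        rw [List.mem_range] at hi
        have hiq : (i : Int) < q - 1 := by omega
        have hbd := hbound i (by omega)
        simp only [Function.comp, zero_add]
        constructor
        · positivity
        · rw [show (i : Int) * step = step * (i : Int) by ring, ← hndef]
          omega
      · exact List.Pairwise.map _ (fun a b hab => by
          simp only [Function.comp, zero_add]
          have hc : (a : Int) ≤ (b : Int) := by exact_mod_cast hab.le
          exact mul_le_mul_of_nonneg_right hc (by omega)) List.pairwise_lt_range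
    -- the last sorted element is the maximum
    have hmax : PySem.List.max? sl (fun x => x) = some (s.getLast hsne) := by
      cases hmx : PySem.List.max? sl (fun x => x) with
      | none =>
        exfalso
        rw [PySem.List.max?_eq_none_iff] at hmx
        rw [hmx] at hndef
        simp at hndef
        omega
      | some m =>
        congr 1
        refine le_antisymm ?_ ?_
        · exact le_getLast_sorted sl s hsdef hsne m ((PySem.List.mem_sorted sl _ false m).2 (PySem.List.max?_mem hmx))
        · exact PySem.List.max?_isMax hmx _ ((PySem.List.mem_sorted sl _ false _).1 (List.getLast_mem hsne))
    -- index -1 reads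
    have hBlast : PySem.List.pyGet? B (-1) = some (B.getLast hBne) := by
      rw [PySem.List.pyGet?_neg_one, List.getLast?_eq_some_getLast]
    have hslast : PySem.List.pyGet? s (-1) = some (s.getLast hsne) := by
      rw [PySem.List.pyGet?_neg_one, List.getLast?_eq_some_getLast]
    -- now unfold both programs
    simp only [bucketing_py, bucketing_py_alt, if_neg hnb]
    rw [← hndef, ← hstepdef, ← hsdef, hslen, hbuckets, hcount, hout, hmax,
        hBlast, hslast]
    simp only []
    by_cases hbe : B.getLast hBne = s.getLast hsne
    · rw [if_neg (by simp [hbe])]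
      congr 1
      conv_lhs => rw [← List.dropLast_concat_getLast hBne]
      rw [hbe]
    · rw [if_pos (by simp [hbe])]

-- ===== VERDICT (by name: the statement is the Claim_ definition above) =====
theorem bucketing_py_spec : Claim_equal_bucketing_py := by
  intro nb sl _hdom hpre
  exact bucketing_eq nb sl hpre
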